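-- pv_equiv track=rewrite | github.com/liam1818buter-collab/intel-monitor | feeds/rate_limiter.py | _check_path_allowed
-- ===== SOURCE A (Python) =====
-- def _check_path_allowed(rules: list, path: str) -> bool:
--     """Check if path is allowed given rules"""
--     allowed = True
--
--     for rule_type, rule_path in rules:
--         if path.startswith(rule_path):
--             if rule_type == 'disallow':
--                 allowed = False
--             elif rule_type == 'allow':
--                 allowed = True
--
--     return allowed
-- ===== SOURCE B (Python) =====
-- def _check_path_allowed(rules: list, path: str) -> bool:
--     """Check if path is allowed given rules (scan last decisive rule first)."""
--     for rule_type, rule_path in reversed(rules):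
--         if path.startswith(rule_path):
--             if rule_type == 'disallow':
--                 return False
--             if rule_type == 'allow':
--                 return True
--     return True
-- ===== Notes on version B (the rewrite author's own statement) =====
-- stated objective: simpler
-- what changed: B scans the rules in reverse and short-circuits on the last decisive matching rule, instead of A's full forward pass accumulating a boolean.
import Mathlib
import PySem

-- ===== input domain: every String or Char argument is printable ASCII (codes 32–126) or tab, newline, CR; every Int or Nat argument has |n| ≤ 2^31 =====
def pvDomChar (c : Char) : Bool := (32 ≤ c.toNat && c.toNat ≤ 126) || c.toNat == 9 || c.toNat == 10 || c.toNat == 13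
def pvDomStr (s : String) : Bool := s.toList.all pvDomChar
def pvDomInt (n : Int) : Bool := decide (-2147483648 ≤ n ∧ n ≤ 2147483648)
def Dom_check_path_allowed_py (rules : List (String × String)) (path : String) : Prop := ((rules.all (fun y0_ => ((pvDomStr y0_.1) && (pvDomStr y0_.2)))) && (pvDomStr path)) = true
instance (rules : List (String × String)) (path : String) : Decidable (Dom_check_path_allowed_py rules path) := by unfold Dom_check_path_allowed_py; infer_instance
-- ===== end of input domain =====

-- B scans the rules in reverse and short-circuits on the last decisive matching rule,
-- instead of A's full forward pass accumulating a boolean. Return values agree everywhere.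

-- ===== PORT A =====
-- literal transliteration of A: forward fold carrying the 'allowed' accumulator
def check_path_allowed_py (rules : List (String × String)) (path : String) : Bool :=
  rules.foldl
    (fun allowed rule =>
      if PySem.Str.startswith path rule.2 then
        if rule.1 = "disallow" then false
        else if rule.1 = "allow" then true
        else allowed
      else allowed)
    true

-- ===== PORT B =====
-- literal transliteration of B: walk the reversed rule list, return on the first decisive match
def pvRevScan (path : String) : List (String × String) → Bool
  | [] => true
  | (t, p) :: rest =>
      if PySem.Str.startswith path p then
        if t = "disallow" then false
        else if t = "allow" then true
        else pvRevScan path rest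
      else pvRevScan path rest

def check_path_allowed_py_alt (rules : List (String × String)) (path : String) : Bool :=
  pvRevScan path rules.reverse

-- ===== PRECONDITION & SPEC =====
def Spec_check_path_allowed_py (rules : List (String × String)) (path : String) (out : Bool) : Prop := out = check_path_allowed_py_alt rules path
instance (rules : List (String × String)) (path : String) (out : Bool) : Decidable (Spec_check_path_allowed_py rules path out) := by unfold Spec_check_path_allowed_py; infer_instance

-- ===== CLAIM (what is proved, stated in full; the proofs are below) =====
def Claim_equal_check_path_allowed_py : Prop := ∀ (rules : List (String × String)) (path : String), Dom_check_path_allowed_py rules path → Spec_check_path_allowed_py rules path (check_path_allowed_py rules path)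

-- ===== LEMMAS AND PROOFS =====

-- reverse scan with an arbitrary default (the generalisation the induction needs)
def pvRevScanD (path : String) (d : Bool) : List (String × String) → Bool
  | [] => d
  | (t, p) :: rest =>
      if PySem.Str.startswith path p then
        if t = "disallow" then false
        else if t = "allow" then true
        else pvRevScanD path d rest
      else pvRevScanD path d rest

theorem pvRevScanD_append_singleton (path : String) (d : Bool) (l : List (String × String))
    (t p : String) :
    pvRevScanD path d (l ++ [(t, p)]) =
      pvRevScanD path
        (if PySem.Str.startswith path p then
           if t = "disallow" then false else if t = "allow" then true else d
         else d) l := by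
  induction l with
  | nil => simp only [List.nil_append, pvRevScanD]
  | cons x xs ih =>
      obtain ⟨xt, xp⟩ := x
      simp only [List.cons_append, pvRevScanD, ih]

theorem foldl_eq_revScanD (path : String) (l : List (String × String)) (d : Bool) :
    l.foldl
      (fun allowed rule =>
        if PySem.Str.startswith path rule.2 then
          if rule.1 = "disallow" then false
          else if rule.1 = "allow" then true
          else allowed
        else allowed)
      d = pvRevScanD path d l.reverse := by
  induction l generalizing d with
  | nil => simp [pvRevScanD]
  | cons x xs ih =>
      obtain ⟨t, p⟩ := x
      simp only [List.foldl_cons, List.reverse_cons]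
      rw [ih, pvRevScanD_append_singleton]

theorem revScanD_true_eq_revScan (path : String) (l : List (String × String)) :
    pvRevScanD path true l = pvRevScan path l := by
  induction l with
  | nil => rfl
  | cons x xs ih =>
      obtain ⟨t, p⟩ := x
      simp only [pvRevScanD, pvRevScan]
      split_ifs <;> simp [ih]

-- ===== VERDICT (by name: the statement is the Claim_ definition above) =====
theorem check_path_allowed_py_spec : Claim_equal_check_path_allowed_py := by
  intro rules path _
  unfold Spec_check_path_allowed_py check_path_allowed_py check_path_allowed_py_alt
  rw [foldl_eq_revScanD, revScanD_true_eq_revScan]
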